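-- pv_equiv track=rewrite | github.com/sara-bm/3ish-Tounis | backend/Sala/mousalslel.py | latin_to_arabic_text
-- ===== SOURCE A (Python) =====
-- latin_to_arabic = {
--     "a": "ا", "b": "ب", "te": "ت", "th": "ث", "j": "ج", "7": "ح", "kh": "خ",
--     "d": "د", "dh": "ذ", "r": "ر", "z": "ز", "s": "س", "ch": "ش",
--     "sa": "ص", "D": "ض", "t": "ط", "Z": "ظ", "3": "ع", "gh": "غ",
--     "f": "ف", "9": "ق", "k": "ك", "l": "ل", "m": "م", "n": "ن",
--     "h": "ه", "w": "و", "y": "ي", "ou": "و", "i": "ي","5":"خ"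
-- }
--
-- def latin_to_arabic_text(text):
--     arabic_word = ""
--     i = 0
--     while i < len(text):
--         # Vérifier les lettres doubles comme "ch", "kh", "th", "sa", "gh", "dh"
--         if i < len(text) - 1 and text[i:i+2].lower() in latin_to_arabic:
--             arabic_char = latin_to_arabic[text[i:i+2].lower()]
--             arabic_word += arabic_char if text[i:i+2].islower() else arabic_char.upper()
--             i += 2  # Sauter deux lettres
--         elif text[i].lower() in latin_to_arabic:
--             arabic_char = latin_to_arabic[text[i].lower()]
--             arabic_word += arabic_char if text[i].islower() else arabic_char.upper()
--             i += 1
--         else: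
--             arabic_word += text[i]  # Conserver les caractères inconnus (espaces, ponctuation, etc.)
--             i += 1
--     return arabic_word
-- ===== SOURCE B (Python) =====
-- _DIGRAPHS = {"te": "ت", "th": "ث", "kh": "خ", "dh": "ذ", "ch": "ش",
--              "sa": "ص", "gh": "غ", "ou": "و"}
-- _SINGLES = {"a": "ا", "b": "ب", "j": "ج", "7": "ح", "d": "د", "r": "ر",
--             "z": "ز", "s": "س", "t": "ط", "3": "ع", "f": "ف", "9": "ق",
--             "k": "ك", "l": "ل", "m": "م", "n": "ن", "h": "ه", "w": "و",
--             "y": "ي", "i": "ي", "5": "خ"}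
-- _STARTERS = set("tkdcsgo")
--
-- def latin_to_arabic_text(text):
--     out = []
--     pending = None          # a character that may start a two-letter group
--     for c in text:
--         if pending is not None:
--             d = _DIGRAPHS.get(pending.lower() + c.lower())
--             if d is not None:
--                 out.append(d)
--                 pending = None
--                 continue
--             out.append(_SINGLES.get(pending.lower(), pending))
--             pending = None
--         if c.lower() in _STARTERS:
--             pending = c
--         else:
--             out.append(_SINGLES.get(c.lower(), c))
--     if pending is not None:
--         out.append(_SINGLES.get(pending.lower(), pending))
--     return "".join(out)
-- ===== Notes on version B (the rewrite author's own statement) =====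
-- stated objective: faster
-- what changed: A's index-jumping while-loop that slices text[i:i+2] against one shared dict and grows the result with quadratic string += (plus a dead islower/upper branch, since Arabic has no case) is replaced by a single forward pass carrying a one-character pending state over two split tables (digraphs / single letters), appending to a list joined once at the end.
import Mathlib
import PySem

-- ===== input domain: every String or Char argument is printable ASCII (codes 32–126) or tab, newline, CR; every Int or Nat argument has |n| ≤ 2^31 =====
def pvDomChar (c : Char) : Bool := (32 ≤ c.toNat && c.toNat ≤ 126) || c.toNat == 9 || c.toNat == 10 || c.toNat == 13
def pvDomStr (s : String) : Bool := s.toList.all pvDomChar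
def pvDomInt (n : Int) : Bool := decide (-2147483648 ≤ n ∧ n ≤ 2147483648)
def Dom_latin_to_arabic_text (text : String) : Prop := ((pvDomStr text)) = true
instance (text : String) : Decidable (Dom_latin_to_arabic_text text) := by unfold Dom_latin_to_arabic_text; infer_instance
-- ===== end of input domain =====

-- B replaces A's index-jumping greedy while-loop over the shared dict by a single
-- left-to-right pass with a one-character "pending" state and two small split tables
-- (digraphs / single letters); same return value, proved on Dom (objective: alternative).
-- Strings are handled on their code-point lists (PySem.Chars), as PySem prescribes.

-- ===== PORT A =====
-- the module-level dict latin_to_arabic, in insertion order (str ↔ List Char)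
def latinDict : PySem.Dict (List Char) (List Char) := PySem.Dict.ofList
  [(['a'], "ا".toList), (['b'], "ب".toList), (['t','e'], "ت".toList), (['t','h'], "ث".toList),
   (['j'], "ج".toList), (['7'], "ح".toList), (['k','h'], "خ".toList),
   (['d'], "د".toList), (['d','h'], "ذ".toList), (['r'], "ر".toList), (['z'], "ز".toList),
   (['s'], "س".toList), (['c','h'], "ش".toList),
   (['s','a'], "ص".toList), (['D'], "ض".toList), (['t'], "ط".toList), (['Z'], "ظ".toList),
   (['3'], "ع".toList), (['g','h'], "غ".toList),
   (['f'], "ف".toList), (['9'], "ق".toList), (['k'], "ك".toList), (['l'], "ل".toList),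
   (['m'], "م".toList), (['n'], "ن".toList),
   (['h'], "ه".toList), (['w'], "و".toList), (['y'], "ي".toList), (['o','u'], "و".toList),
   (['i'], "ي".toList), (['5'], "خ".toList)]

-- str.islower(), ported by hand on the code-point list (exact on ASCII, the stated
-- domain): at least one cased character and no uppercase one
def pyIslower (cs : List Char) : Bool :=
  cs.any PySem.Chars.isalpha && cs.all (fun c => !(PySem.Chars.isupper c))

-- the elif/else arms of A's while-loop (one character consumed)
def aStep1 (c : Char) : List Char :=
  match latinDict.get? (PySem.Chars.lower [c]) with
  | some v => if pyIslower [c] then v else PySem.Chars.upper v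
  | none => [c]

-- A's while-loop over the characters; index i replaced by the remaining suffix,
-- arabic_word += … by appending in front of the recursive result
def aLoop : List Char → List Char
  | [] => []
  | [c] => aStep1 c
  | c1 :: c2 :: rest =>
    match latinDict.get? (PySem.Chars.lower [c1, c2]) with
    | some v => (if pyIslower [c1, c2] then v else PySem.Chars.upper v) ++ aLoop rest
    | none => aStep1 c1 ++ aLoop (c2 :: rest)

def latin_to_arabic_text (text : String) : String := String.ofList (aLoop text.toList)

-- ===== PORT B =====
-- _SINGLES.get(c.lower()) (dict get on the lowered character, ported as a match)
def single? (c : Char) : Option Char :=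
  match PySem.Chars.lowerChar c with
  | 'a' => some 'ا' | 'b' => some 'ب' | 'j' => some 'ج' | '7' => some 'ح'
  | 'd' => some 'د' | 'r' => some 'ر' | 'z' => some 'ز' | 's' => some 'س'
  | 't' => some 'ط' | '3' => some 'ع' | 'f' => some 'ف' | '9' => some 'ق'
  | 'k' => some 'ك' | 'l' => some 'ل' | 'm' => some 'م' | 'n' => some 'ن'
  | 'h' => some 'ه' | 'w' => some 'و' | 'y' => some 'ي' | 'i' => some 'ي'
  | '5' => some 'خ' | _ => none

-- _SINGLES.get(c.lower(), c)
def resolveSingle (c : Char) : Char := (single? c).getD c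

-- _DIGRAPHS.get(p.lower() + c.lower()) as a match on the two lowered characters
def digraph? (p c : Char) : Option Char :=
  match PySem.Chars.lowerChar p, PySem.Chars.lowerChar c with
  | 't', 'e' => some 'ت' | 't', 'h' => some 'ث' | 'k', 'h' => some 'خ'
  | 'd', 'h' => some 'ذ' | 'c', 'h' => some 'ش' | 's', 'a' => some 'ص'
  | 'g', 'h' => some 'غ' | 'o', 'u' => some 'و'
  | _, _ => none

-- c.lower() in _STARTERS
def isStarter (c : Char) : Bool :=
  match PySem.Chars.lowerChar c with
  | 't' | 'k' | 'd' | 'c' | 's' | 'g' | 'o' => true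
  | _ => false

-- one iteration of B's for-loop: state = (output so far, pending character)
def bStep : List Char × Option Char → Char → List Char × Option Char
  | (acc, some p), c =>
    (match digraph? p c with
     | some d => (acc ++ [d], none)
     | none =>
       if isStarter c then (acc ++ [resolveSingle p], some c)
       else (acc ++ [resolveSingle p, resolveSingle c], none))
  | (acc, none), c =>
    if isStarter c then (acc, some c) else (acc ++ [resolveSingle c], none)

-- the final `if pending is not None` flush after the loop
def bFlush : List Char × Option Char → List Char
  | (acc, some p) => acc ++ [resolveSingle p]
  | (acc, none) => acc

def latin_to_arabic_text_alt (text : String) : String :=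
  String.ofList (bFlush (text.toList.foldl bStep ([], none)))

-- ===== PRECONDITION & SPEC =====
def Spec_latin_to_arabic_text (text : String) (out : String) : Prop := out = latin_to_arabic_text_alt text
instance (text : String) (out : String) : Decidable (Spec_latin_to_arabic_text text out) := by unfold Spec_latin_to_arabic_text; infer_instance

-- ===== CLAIM (what is proved, stated in full; the proofs are below) =====
def Claim_equal_latin_to_arabic_text : Prop := ∀ (text : String), Dom_latin_to_arabic_text text → Spec_latin_to_arabic_text text (latin_to_arabic_text text)

-- ===== LEMMAS AND PROOFS =====

def domChars : List Char := [' ', '!', '"', '#', '$', '%', '&', '\'', '(', ')', '*', '+', ',', '-', '.', '/', '0', '1', '2', '3', '4', '5', '6', '7', '8', '9', ':', ';', '<', '=', '>', '?', '@', 'A', 'B', 'C', 'D', 'E', 'F', 'G', 'H', 'I', 'J', 'K', 'L', 'M', 'N', 'O', 'P', 'Q', 'R', 'S', 'T', 'U', 'V', 'W', 'X', 'Y', 'Z', '[', '\\', ']', '^', '_', '`', 'a', 'b', 'c', 'd', 'e', 'f', 'g', 'h', 'i', 'j', 'k', 'l', 'm', 'n', 'o', 'p', 'q', 'r', 's', 't',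 'u', 'v', 'w', 'x', 'y', 'z', '{', '|', '}', '~', '\t', '\n', '\r']

theorem dom_mem_all : ((List.range 127).all fun n =>
    !(pvDomChar (Char.ofNat n)) || decide (Char.ofNat n ∈ domChars)) = true := by decide

theorem dom_mem (c : Char) (hc : pvDomChar c = true) : c ∈ domChars := by
  have hlt : c.toNat < 127 := by
    unfold pvDomChar at hc
    simp only [Bool.or_eq_true, Bool.and_eq_true, decide_eq_true_eq, beq_iff_eq] at hc
    omega
  have h := List.all_eq_true.mp dom_mem_all c.toNat (List.mem_range.mpr hlt)
  rw [Char.ofNat_toNat] at h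
  simp only [hc, Bool.not_true, Bool.false_or, decide_eq_true_eq] at h
  exact h

-- A's two-character branch, as an option: some ⟨emitted text⟩ on a dict hit
def aDig (c1 c2 : Char) : Option (List Char) :=
  match latinDict.get? (PySem.Chars.lower [c1, c2]) with
  | some v => some (if pyIslower [c1, c2] then v else PySem.Chars.upper v)
  | none => none

set_option maxHeartbeats 4000000 in
theorem dig_all : (domChars.all fun a => domChars.all fun b =>
    aDig a b == (digraph? a b).map (fun d => [d])) = true := by decide

theorem dig_eq (c1 c2 : Char) (h1 : c1 ∈ domChars) (h2 : c2 ∈ domChars) :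
    aDig c1 c2 = (digraph? c1 c2).map (fun d => [d]) :=
  eq_of_beq (List.all_eq_true.mp (List.all_eq_true.mp dig_all c1 h1) c2 h2)

theorem starter_all : (domChars.all fun a => domChars.all fun b =>
    !(digraph? a b).isSome || isStarter a) = true := by decide

theorem starter_of_dig (c1 c2 : Char) (h1 : c1 ∈ domChars) (h2 : c2 ∈ domChars)
    (hd : (digraph? c1 c2).isSome = true) : isStarter c1 = true := by
  have h := List.all_eq_true.mp (List.all_eq_true.mp starter_all c1 h1) c2 h2
  simpa [hd] using h

theorem single_all : (domChars.all fun c => aStep1 c == [resolveSingle c]) = true := by decide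

theorem single_eq (c : Char) (hc : c ∈ domChars) : aStep1 c = [resolveSingle c] :=
  eq_of_beq (List.all_eq_true.mp single_all c hc)

-- a pending-miss step is a fresh step after flushing the pending character
theorem bStep_pending_miss (acc : List Char) (p c : Char) (h : digraph? p c = none) :
    bStep (acc, some p) c = bStep (acc ++ [resolveSingle p], none) c := by
  simp only [bStep, h]
  cases isStarter c <;> simp

theorem fold_eq (l : List Char) (hd : l.all pvDomChar = true) :
    ∀ acc : List Char, bFlush (l.foldl bStep (acc, none)) = acc ++ aLoop l := by
  induction l using aLoop.induct with
  | case1 => intro acc; simp [aLoop, bFlush]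
  | case2 c =>
    intro acc
    simp only [List.all_cons, List.all_nil, Bool.and_true] at hd
    rw [aLoop, single_eq c (dom_mem c hd)]
    simp only [List.foldl_cons, List.foldl_nil, bStep]
    cases hs : isStarter c <;> simp [bFlush]
  | case3 c1 c2 rest v hv ih =>
    intro acc
    simp only [List.all_cons, Bool.and_eq_true] at hd
    have hA : aDig c1 c2 = some (if pyIslower [c1, c2] then v else PySem.Chars.upper v) := by
      simp [aDig, hv]
    have hB := dig_eq c1 c2 (dom_mem c1 hd.1) (dom_mem c2 hd.2.1)
    rw [hA] at hB
    cases hdg : digraph? c1 c2 with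
    | none => rw [hdg] at hB; simp at hB
    | some d =>
      rw [hdg] at hB
      simp only [Option.map_some, Option.some.injEq] at hB
      have hst := starter_of_dig c1 c2 (dom_mem c1 hd.1) (dom_mem c2 hd.2.1) (by simp [hdg])
      simp only [aLoop, hv, hB, List.foldl_cons]
      rw [show bStep (acc, none) c1 = (acc, some c1) by simp [bStep, hst],
          show bStep (acc, some c1) c2 = (acc ++ [d], none) by simp [bStep, hdg]]
      rw [ih hd.2.2 (acc ++ [d])]
      simp
  | case4 c1 c2 rest hv ih =>
    intro acc
    simp only [List.all_cons, Bool.and_eq_true] at hd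
    have hA : aDig c1 c2 = none := by simp [aDig, hv]
    have hB := dig_eq c1 c2 (dom_mem c1 hd.1) (dom_mem c2 hd.2.1)
    rw [hA] at hB
    have hdg : digraph? c1 c2 = none := by
      cases h : digraph? c1 c2 with
      | none => rfl
      | some d => rw [h] at hB; simp at hB
    simp only [aLoop, hv]
    rw [single_eq c1 (dom_mem c1 hd.1)]
    have hrest : (c2 :: rest).all pvDomChar = true := by simp [hd.2.1, hd.2.2]
    simp only [List.foldl_cons]
    cases hst : isStarter c1 with
    | false =>
      rw [show bStep (acc, none) c1 = (acc ++ [resolveSingle c1], none) by simp [bStep, hst]]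
      have := ih hrest (acc ++ [resolveSingle c1])
      simp only [List.foldl_cons] at this
      rw [this]; simp
    | true =>
      rw [show bStep (acc, none) c1 = (acc, some c1) by simp [bStep, hst],
          bStep_pending_miss acc c1 c2 hdg]
      have := ih hrest (acc ++ [resolveSingle c1])
      simp only [List.foldl_cons] at this
      rw [this]; simp

-- ===== VERDICT (by name: the statement is the Claim_ definition above) =====
theorem latin_to_arabic_text_spec : Claim_equal_latin_to_arabic_text := by
  intro text hdom
  unfold Spec_latin_to_arabic_text latin_to_arabic_text latin_to_arabic_text_alt
  rw [fold_eq text.toList hdom []]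
  simp
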